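-- pv_equiv track=rewrite | github.com/ucsc-redwood/redwood-aio | scripts/.old/fun.py | partition_stages
-- ===== SOURCE A (Python) =====
-- def partition_stages(stages):
--     """
--     Generate all ways to partition a list of stages into consecutive chunks.
--     E.g. for [1,2,3], we get:
--       [[1,2,3]],
--       [[1],[2,3]],
--       [[1,2],[3]],
--       [[1],[2],[3]]
--     """
--     n = len(stages)
--     if n <= 1:
--         yield [stages]
--         return
--
--     for cut_pattern in range(1 << (n - 1)):
--         chunk = []
--         partition = []
--         for i in range(n):
--             chunk.append(stages[i])
--             if (i == n - 1) or (cut_pattern & (1 << i)):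
--                 partition.append(chunk)
--                 chunk = []
--         yield partition
-- ===== SOURCE B (Python) =====
-- def partition_stages(stages):
--     """Recursive re-implementation: recurse on all but the last element; for each
--     sub-partition first yield it with the last stage merged into its final chunk,
--     then yield all of them again with the last stage as its own singleton chunk."""
--     if len(stages) <= 1:
--         yield [list(stages)]
--         return
--     subs = list(partition_stages(stages[:-1]))
--     last = stages[-1]
--     for p in subs:
--         yield p[:-1] + [p[-1] + [last]]
--     for p in subs:
--         yield p + [[last]]
-- ===== Notes on version B (the rewrite author's own statement) =====
-- stated objective: alternative
-- what changed: Replaced A's bitmask enumeration (for each of the 2^(n-1) cut patterns, an inner loop re-scans the whole list testing bits) by a recursion on the last element: compute the partitions of stages[:-1] once, then emit each with the last stage merged into its final chunk, followed by each with the last stage as a new singleton chunk, which reproduces A's exact output order.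
import Mathlib
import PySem

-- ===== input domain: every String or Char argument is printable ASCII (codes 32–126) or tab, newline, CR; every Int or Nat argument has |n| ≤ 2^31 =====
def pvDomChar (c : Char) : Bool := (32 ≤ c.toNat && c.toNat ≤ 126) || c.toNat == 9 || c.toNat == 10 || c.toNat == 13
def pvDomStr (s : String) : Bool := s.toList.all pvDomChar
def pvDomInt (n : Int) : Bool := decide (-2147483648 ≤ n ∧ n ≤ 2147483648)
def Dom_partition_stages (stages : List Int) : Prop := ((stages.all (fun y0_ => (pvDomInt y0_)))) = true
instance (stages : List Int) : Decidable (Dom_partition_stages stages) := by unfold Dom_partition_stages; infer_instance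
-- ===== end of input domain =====

-- B replaces A's bitmask enumeration by a recursion on the last stage (merge-into-last-chunk
-- variants first, then new-singleton-chunk variants), reproducing A's exact output order.

-- ===== PORT A =====
-- A is a generator; its port returns the list of yielded values in order.
-- stages[i] is ported as PySem.List.pyGetD (i is always in range); the cut_pattern counter
-- is a Nat (Python's range values here are the nonnegative ints 0 .. 2^(n-1)-1, and the
-- bitwise test `cut_pattern & (1 << i)` is identical on Nat).
def partition_stages (stages : List Int) : List (List (List Int)) :=
  let n := stages.length
  if n ≤ 1 then [[stages]]
  else
    (List.range (1 <<< (n - 1))).map (fun cut_pattern =>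
      ((List.range n).foldl
        (fun (st : List Int × List (List Int)) (i : Nat) =>
          let chunk := st.1 ++ [PySem.List.pyGetD stages (i : Int) 0]
          if i == n - 1 || (cut_pattern &&& ((1 : Nat) <<< i)) != 0 then
            ([], st.2 ++ [chunk])
          else (chunk, st.2))
        ([], [])).2)

-- ===== PORT B =====
-- Port of Source B: recursion on stages[:-1]; the two yield-loops become two maps, concatenated.
def partition_stages_alt (stages : List Int) : List (List (List Int)) :=
  if stages.length ≤ 1 then [[stages]]
  else
    let subs := partition_stages_alt (PySem.List.slice stages none (some (-1)))
    let last := PySem.List.pyGetD stages (-1) 0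
    (subs.map fun p =>
        PySem.List.slice p none (some (-1)) ++ [PySem.List.pyGetD p (-1) [] ++ [last]]) ++
    (subs.map fun p => p ++ [[last]])
termination_by stages.length
decreasing_by simp [PySem.List.slice_to_neg_one, List.length_dropLast]; omega

-- ===== PRECONDITION & SPEC =====
def Spec_partition_stages (stages : List Int) (out : List (List (List Int))) : Prop := out = partition_stages_alt stages
instance (stages : List Int) (out : List (List (List Int))) : Decidable (Spec_partition_stages stages out) := by unfold Spec_partition_stages; infer_instance

-- ===== CLAIM (what is proved, stated in full; the proofs are below) =====
def Claim_equal_partition_stages : Prop := ∀ (stages : List Int), Dom_partition_stages stages → Spec_partition_stages stages (partition_stages stages)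

-- ===== LEMMAS AND PROOFS =====

-- A's inner loop, as a structural recursion over the still-unprocessed suffix:
-- segd xs cut i acc = (chunks flushed while scanning xs starting at index i with open chunk acc,
--                      the open chunk left at the end).
def segd : List Int → (Nat → Bool) → Nat → List Int → List (List Int) × List Int
  | [], _, _, acc => ([], acc)
  | x :: xs, cut, i, acc =>
    if cut i then
      ((acc ++ [x]) :: (segd xs cut (i + 1) []).1, (segd xs cut (i + 1) []).2)
    else segd xs cut (i + 1) (acc ++ [x])

theorem segd_cons (y : Int) (xs : List Int) (cut : Nat → Bool) (i : Nat) (acc : List Int) :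
    segd (y :: xs) cut i acc =
      if cut i then
        ((acc ++ [y]) :: (segd xs cut (i + 1) []).1, (segd xs cut (i + 1) []).2)
      else segd xs cut (i + 1) (acc ++ [y]) := rfl

-- A's cut predicate for a list of length n and pattern cp.
def cutA (n cp i : Nat) : Bool := i == n - 1 || (cp &&& ((1 : Nat) <<< i)) != 0

-- The partition A yields for pattern cp.
def pieces (stages : List Int) (cp : Nat) : List (List Int) :=
  (segd stages (cutA stages.length cp) 0 []).1

theorem and_shift_ne_zero (cp i : Nat) : ((cp &&& ((1 : Nat) <<< i)) != 0) = cp.testBit i := by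
  rcases h : cp.testBit i with _ | _ <;> simp [Nat.one_shiftLeft, Nat.and_two_pow, h]

theorem pyGetD_neg_one_eq_getLastD {α : Type} (xs : List α) (d : α) (h : xs ≠ []) :
    PySem.List.pyGetD xs (-1) d = xs.getLastD d := by
  rw [PySem.List.pyGetD_neg_one xs d h, List.getLastD_eq_getLast?,
    List.getLast?_eq_some_getLast h, Option.getD_some]

-- Bridge: A's foldl over range' equals segd over the corresponding suffix.
theorem foldl_segd (stages : List Int) (cp : Nat) :
    ∀ (xs : List Int) (i : Nat) (acc : List Int) (part : List (List Int)),
      stages.drop i = xs →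
      ((List.range' i xs.length).foldl
          (fun (st : List Int × List (List Int)) (i : Nat) =>
            if i == stages.length - 1 || (cp &&& ((1 : Nat) <<< i)) != 0 then
              ([], st.2 ++ [st.1 ++ [PySem.List.pyGetD stages (i : Int) 0]])
            else (st.1 ++ [PySem.List.pyGetD stages (i : Int) 0], st.2))
          (acc, part))
        = ((segd xs (cutA stages.length cp) i acc).2,
           part ++ (segd xs (cutA stages.length cp) i acc).1) := by
  intro xs
  induction xs with
  | nil => intro i acc part h; simp [segd]
  | cons y ys ih =>
    intro i acc part h
    have hy : PySem.List.pyGetD stages (i : Int) 0 = y := by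
      rw [PySem.List.pyGetD_natCast]
      have : stages[i]? = some y := by
        have := List.getElem?_drop (xs := stages) (i := i) (j := 0)
        simpa [h] using this.symm
      simp [List.getD, this]
    have hdrop : stages.drop (i + 1) = ys := by
      rw [show stages.drop (i + 1) = (stages.drop i).tail from by rw [List.tail_drop], h]
      rfl
    by_cases hc : cutA stages.length cp i
    · have hc' : (i == stages.length - 1 || (cp &&& ((1 : Nat) <<< i)) != 0) = true := hc
      simp only [List.length_cons, List.range'_succ, List.foldl_cons, hy, hc', reduceIte]
      rw [segd_cons, if_pos hc, ih (i + 1) [] (part ++ [acc ++ [y]]) hdrop]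
      simp
    · have hc' : (i == stages.length - 1 || (cp &&& ((1 : Nat) <<< i)) != 0) = false := by
        simpa [cutA] using hc
      simp only [List.length_cons, List.range'_succ, List.foldl_cons, hy, hc',
        Bool.false_eq_true, reduceIte]
      rw [segd_cons, if_neg (by simpa [cutA] using hc),
        ih (i + 1) (acc ++ [y]) part hdrop]

-- Appending one element to the scanned list.
theorem segd_concat (x : Int) (cut : Nat → Bool) :
    ∀ (xs : List Int) (i : Nat) (acc : List Int),
      segd (xs ++ [x]) cut i acc =
        if cut (i + xs.length) then
          ((segd xs cut i acc).1 ++ [(segd xs cut i acc).2 ++ [x]], [])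
        else ((segd xs cut i acc).1, (segd xs cut i acc).2 ++ [x]) := by
  intro xs
  induction xs with
  | nil => intro i acc; by_cases h : cut i <;> simp [segd, h]
  | cons y ys ih =>
    intro i acc
    have hlen : i + (y :: ys).length = (i + 1) + ys.length := by simp; omega
    simp only [List.cons_append, segd, hlen, ih]
    by_cases h : cut i <;> by_cases h2 : cut ((i + 1) + ys.length) <;> simp [h, h2]

theorem segd_congr (cut cut' : Nat → Bool) :
    ∀ (xs : List Int) (i : Nat) (acc : List Int),
      (∀ j, i ≤ j → j < i + xs.length → cut j = cut' j) →
      segd xs cut i acc = segd xs cut' i acc := by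
  intro xs
  induction xs with
  | nil => intros; rfl
  | cons y ys ih =>
    intro i acc hag
    have h0 : cut i = cut' i := hag i le_rfl (by simp)
    have hrec : ∀ a, segd ys cut (i + 1) a = segd ys cut' (i + 1) a := fun a =>
      ih (i + 1) a (fun j hj1 hj2 => hag j (by omega) (by simp at hj2 ⊢; omega))
    simp only [segd, h0]
    by_cases h : cut' i <;> simp [h, hrec]

theorem segd_flush (cut : Nat → Bool) :
    ∀ (xs : List Int) (i : Nat) (acc : List Int), xs ≠ [] →
      cut (i + xs.length - 1) = true →
      (segd xs cut i acc).2 = [] ∧ (segd xs cut i acc).1 ≠ [] := by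
  intro xs
  induction xs with
  | nil => intro i acc h; exact absurd rfl h
  | cons y ys ih =>
    intro i acc _ hcut
    cases ys with
    | nil =>
      have : cut i = true := by simpa using hcut
      simp [segd, this]
    | cons z zs =>
      have hlen : (i + 1) + (z :: zs).length - 1 = i + (y :: z :: zs).length - 1 := by
        simp; omega
      by_cases h : cut i
      · have := ih (i + 1) [] (by simp) (by rw [hlen]; exact hcut)
        rw [segd_cons, if_pos h]
        exact ⟨this.1, by simp⟩
      · have := ih (i + 1) (acc ++ [y]) (by simp) (by rw [hlen]; exact hcut)
        rw [segd_cons, if_neg h]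
        exact this

-- Turning the forced final cut off: the last flushed chunk becomes the open chunk.
theorem segd_lastFalse (cut cut' : Nat → Bool) :
    ∀ (xs : List Int) (i : Nat) (acc : List Int), xs ≠ [] →
      (∀ j, i ≤ j → j < i + xs.length - 1 → cut j = cut' j) →
      cut (i + xs.length - 1) = true → cut' (i + xs.length - 1) = false →
      segd xs cut' i acc =
        ((segd xs cut i acc).1.dropLast, (segd xs cut i acc).1.getLastD []) := by
  intro xs
  induction xs with
  | nil => intro i acc h; exact absurd rfl h
  | cons y ys ih =>
    intro i acc _ hag hlast hlast'
    cases ys with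
    | nil =>
      have hc : cut i = true := by simpa using hlast
      have hc' : cut' i = false := by simpa using hlast'
      simp [segd, hc, hc']
    | cons z zs =>
      have h0 : cut i = cut' i := hag i le_rfl (by simp only [List.length_cons]; omega)
      have hlen : (i + 1) + (z :: zs).length - 1 = i + (y :: z :: zs).length - 1 := by
        simp only [List.length_cons]; omega
      have hihall : ∀ a, segd (z :: zs) cut' (i + 1) a =
          ((segd (z :: zs) cut (i + 1) a).1.dropLast,
           (segd (z :: zs) cut (i + 1) a).1.getLastD []) := fun a =>
        ih (i + 1) a (by simp)
          (fun j hj1 hj2 => hag j (by omega)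
            (by simp only [List.length_cons] at hj2 ⊢; omega))
          (by rw [hlen]; exact hlast) (by rw [hlen]; exact hlast')
      by_cases h : cut' i
      · have hc : cut i = true := by rw [h0]; exact h
        have hne := (segd_flush cut (z :: zs) (i + 1) [] (by simp)
          (by rw [hlen]; exact hlast)).2
        conv_lhs => rw [segd_cons, if_pos h, hihall []]
        conv_rhs => rw [segd_cons, if_pos hc]
        simp [List.dropLast_cons_of_ne_nil hne]
        cases hq : (segd (z :: zs) cut (i + 1) []).1 with
        | nil => exact absurd hq hne
        | cons a as => simp [List.getLast?_cons_cons]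
      · have hc : cut i = false := by rw [h0]; simpa using h
        conv_lhs => rw [segd_cons, if_neg h, hihall (acc ++ [y])]
        conv_rhs => rw [segd_cons, if_neg (show ¬cut i = true by simp [hc])]

theorem pieces_merge (ys : List Int) (x : Int) (cp : Nat) (hys : ys ≠ [])
    (hcp : cp < 2 ^ (ys.length - 1)) :
    pieces (ys ++ [x]) cp =
      (pieces ys cp).dropLast ++ [(pieces ys cp).getLastD [] ++ [x]] := by
  have hn : 1 ≤ ys.length := List.length_pos_iff.mpr hys
  unfold pieces
  rw [show (ys ++ [x]).length = ys.length + 1 from by simp]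
  rw [segd_concat x (cutA (ys.length + 1) cp) ys 0 []]
  rw [if_pos (show cutA (ys.length + 1) cp (0 + ys.length) = true from by simp [cutA])]
  have hag : ∀ j, 0 ≤ j → j < 0 + ys.length - 1 →
      cutA ys.length cp j = cutA (ys.length + 1) cp j := by
    intro j _ hj
    have h1 : (j == ys.length - 1) = false := by simp; omega
    have h3 : (j == ys.length) = false := by simp; omega
    simp [cutA, h1, h3]
  have hlast : cutA ys.length cp (0 + ys.length - 1) = true := by simp [cutA]
  have hlast' : cutA (ys.length + 1) cp (0 + ys.length - 1) = false := by
    have h1 : (0 + ys.length - 1 == ys.length + 1 - 1) = false := by simp; omega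
    simp [cutA, and_shift_ne_zero]
    exact ⟨by omega, Nat.testBit_lt_two_pow hcp⟩
  rw [segd_lastFalse (cutA ys.length cp) (cutA (ys.length + 1) cp) ys 0 [] hys hag
    hlast hlast']

theorem pieces_sep (ys : List Int) (x : Int) (cp : Nat) (hys : ys ≠ [])
    (hcp : cp < 2 ^ (ys.length - 1)) :
    pieces (ys ++ [x]) (2 ^ (ys.length - 1) + cp) = pieces ys cp ++ [[x]] := by
  have hn : 1 ≤ ys.length := List.length_pos_iff.mpr hys
  unfold pieces
  rw [show (ys ++ [x]).length = ys.length + 1 from by simp]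
  rw [segd_concat x (cutA (ys.length + 1) (2 ^ (ys.length - 1) + cp)) ys 0 []]
  rw [if_pos (show cutA (ys.length + 1) (2 ^ (ys.length - 1) + cp) (0 + ys.length) = true
    from by simp [cutA])]
  have hag : ∀ j, 0 ≤ j → j < 0 + ys.length →
      cutA (ys.length + 1) (2 ^ (ys.length - 1) + cp) j = cutA ys.length cp j := by
    intro j _ hj
    by_cases hje : j = ys.length - 1
    · have h1 : (j == ys.length + 1 - 1) = false := by simp; omega
      have h2 : (j == ys.length - 1) = true := by simp [hje]
      simp only [cutA, h1, h2, and_shift_ne_zero, Bool.false_or, Bool.true_or]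
      rw [hje, Nat.testBit_two_pow_add_eq, Nat.testBit_lt_two_pow hcp]
      rfl
    · have h1 : (j == ys.length + 1 - 1) = false := by simp; omega
      have h2 : (j == ys.length - 1) = false := by simp [hje]
      simp only [cutA, h1, h2, and_shift_ne_zero, Bool.false_or]
      rw [Nat.testBit_two_pow_add_gt (by omega) cp]
  rw [segd_congr _ _ ys 0 [] hag]
  have hfl := segd_flush (cutA ys.length cp) ys 0 [] hys (by simp [cutA])
  rw [hfl.1]
  simp

theorem partA_pieces (stages : List Int) (h : stages ≠ []) :
    partition_stages stages = (List.range (2 ^ (stages.length - 1))).map (pieces stages) := by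
  by_cases h1 : stages.length ≤ 1
  · obtain ⟨a, rfl⟩ : ∃ a, stages = [a] := by
      cases stages with
      | nil => exact absurd rfl h
      | cons a as =>
        cases as with
        | nil => exact ⟨a, rfl⟩
        | cons b bs => simp at h1
    simp [partition_stages, pieces, segd, cutA, List.range_one]
  · simp only [partition_stages]
    rw [if_neg h1, show (1 <<< (stages.length - 1)) = 2 ^ (stages.length - 1) from
      Nat.one_shiftLeft _]
    apply List.map_congr_left
    intro cp _
    have hb := foldl_segd stages cp stages 0 [] [] (by simp)
    rw [List.range_eq_range']
    exact Eq.trans (congrArg Prod.snd hb) (by simp [pieces])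

theorem partAB (stages : List Int) : partition_stages stages = partition_stages_alt stages := by
  suffices H : ∀ (n : Nat) (stages : List Int), stages.length ≤ n →
      partition_stages stages = partition_stages_alt stages from
    H stages.length stages le_rfl
  intro n
  induction n with
  | zero =>
    intro stages hle
    have : stages = [] := List.length_eq_zero_iff.mp (Nat.le_zero.mp hle)
    subst this
    rw [partition_stages_alt]
    simp [partition_stages]
  | succ n ihn =>
    intro stages hle
    rw [partition_stages_alt]
    by_cases h1 : stages.length ≤ 1
    · rw [if_pos h1]
      simp [partition_stages, h1]
    · rw [if_neg h1]
      have hne : stages ≠ [] := by intro e; rw [e] at h1; simp at h1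
      have hys : stages.dropLast ≠ [] := by
        intro e
        have := congrArg List.length e
        simp [List.length_dropLast] at this
        omega
      have hm : 1 ≤ stages.dropLast.length := List.length_pos_iff.mpr hys
      have hgl : stages.getLastD 0 = stages.getLast hne := by
        rw [List.getLastD_eq_getLast?, List.getLast?_eq_some_getLast hne]; rfl
      have hx : stages.dropLast ++ [stages.getLastD 0] = stages := by
        rw [hgl]; exact List.dropLast_append_getLast hne
      rw [PySem.List.slice_to_neg_one, pyGetD_neg_one_eq_getLastD stages 0 hne]
      rw [← ihn stages.dropLast (by simp [List.length_dropLast]; omega)]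
      rw [partA_pieces stages.dropLast hys, partA_pieces stages hne]
      have hpow : (2 : Nat) ^ (stages.length - 1) =
          2 ^ (stages.dropLast.length - 1) + 2 ^ (stages.dropLast.length - 1) := by
        have h2 : stages.length - 1 = (stages.dropLast.length - 1) + 1 := by
          simp [List.length_dropLast]; omega
        rw [h2, pow_succ]; ring
      rw [hpow, List.range_add, List.map_append, List.map_map]
      refine congrArg₂ (· ++ ·) ?_ ?_
      · rw [List.map_map]
        apply List.map_congr_left
        intro cp hcp
        rw [List.mem_range] at hcp
        have hpne : pieces stages.dropLast cp ≠ [] :=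
          (segd_flush (cutA stages.dropLast.length cp) stages.dropLast 0 []
            hys (by simp [cutA])).2
        simp only [Function.comp_apply, PySem.List.slice_to_neg_one]
        have hme := pieces_merge stages.dropLast (stages.getLastD 0) cp hys hcp
        rw [hx] at hme
        rw [hme, pyGetD_neg_one_eq_getLastD _ _ hpne]
      · rw [List.map_map]
        apply List.map_congr_left
        intro cp hcp
        rw [List.mem_range] at hcp
        simp only [Function.comp_apply]
        have hse := pieces_sep stages.dropLast (stages.getLastD 0) cp hys hcp
        rw [hx] at hse
        exact hse

-- ===== VERDICT (by name: the statement is the Claim_ definition above) =====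
theorem partition_stages_spec : Claim_equal_partition_stages := by
  intro stages _
  unfold Spec_partition_stages
  exact partAB stages
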